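-- pv_equiv track=rewrite | github.com/fedarko/strainFlye | strainflye/smooth_utils.py | convert_to_runs
-- ===== SOURCE A (Python) =====
-- def convert_to_runs(positions):
--     """Converts a (sorted) list of ints to a list of runs of consecutive ints.
--
--     Note that this doesn't take into account any sort of "loop-around" effect
--     (e.g. in the case of cyclic contigs). This doesn't even have any knowledge
--     about these positions being from a contig -- so this function don't know
--     the contig length, etc. Simpler is probably better for this.
--
--     Parameters
--     ----------
--     positions: list of int
--         Assumed to be sorted.
--
--     Returns
--     -------
--     runs: list of 2-tuples of int
--         Each entry in this list is a 2-tuple of the format (p1, p2), where p1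
--         and p2 are both ints such that [p1, p1 + 1, p1 + 2, ..., p2] are all
--         present in positions.
--
--         If any of the runs contains only an "isolated" position p, then this
--         particular run will be accounted for in runs as a 2-tuple of (p, p)
--         indicating this case.
--
--         If positions was empty, this will be an empty list.
--     """
--     runs = []
--     if len(positions) > 1:
--         prev_pos = positions[0]
--         run_start_pos = positions[0]
--         for sp in positions[1:]:
--             if prev_pos == sp - 1:
--                 prev_pos = sp
--             else:
--                 runs.append((run_start_pos, prev_pos))
--                 run_start_pos = sp
--                 prev_pos = sp
--
--         runs.append((run_start_pos, sp))
--     elif len(positions) == 1: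
--         runs.append((positions[0], positions[0]))
--     return runs
-- ===== SOURCE B (Python) =====
-- def convert_to_runs(positions):
--     """Build the runs back-to-front: scan positions in reverse, merging each
--     position into the most recently started run when consecutive."""
--     rev = []  # runs of the processed suffix, leftmost run last
--     for p in reversed(positions):
--         if rev and rev[-1][0] == p + 1:
--             rev[-1] = (p, rev[-1][1])
--         else:
--             rev.append((p, p))
--     rev.reverse()
--     return rev
-- ===== Notes on version B (the rewrite author's own statement) =====
-- stated objective: alternative
-- what changed: Replaces A's forward prev_pos/run_start state machine with separate len==1 and len>1 branches by a single reverse scan that merges each position into the most recently started run when consecutive, then reverses the run list.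
import Mathlib
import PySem

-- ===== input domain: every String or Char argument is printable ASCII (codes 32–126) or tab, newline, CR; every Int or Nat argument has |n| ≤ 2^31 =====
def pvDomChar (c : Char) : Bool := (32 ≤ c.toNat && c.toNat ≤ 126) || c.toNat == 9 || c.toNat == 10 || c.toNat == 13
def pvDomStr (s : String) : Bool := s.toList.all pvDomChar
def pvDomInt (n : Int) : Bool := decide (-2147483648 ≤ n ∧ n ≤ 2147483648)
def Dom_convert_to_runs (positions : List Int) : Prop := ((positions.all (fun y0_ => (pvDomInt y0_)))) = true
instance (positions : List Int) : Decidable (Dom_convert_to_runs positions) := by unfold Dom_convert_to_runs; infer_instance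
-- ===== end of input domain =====

-- B builds the runs by a reverse scan that merges into the most recently started run
-- (alternative decomposition, same O(n) cost); A's forward state machine is ported as is.

-- ===== PORT A =====
-- the for-loop over positions[1:] as structural recursion over the same state (runs, prev_pos, run_start_pos)
def convert_to_runs_loop (runs : List (Int × Int)) (prev_pos run_start_pos : Int) :
    List Int → List (Int × Int) × Int × Int
  | [] => (runs, prev_pos, run_start_pos)
  | sp :: rest =>
    if prev_pos == sp - 1 then convert_to_runs_loop runs sp run_start_pos rest
    else convert_to_runs_loop (runs ++ [(run_start_pos, prev_pos)]) sp sp rest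

def convert_to_runs (positions : List Int) : List (Int × Int) :=
  match positions with
  | [] => []                         -- len(positions) == 0: runs stays []
  | [p] => [(p, p)]                  -- len(positions) == 1 branch
  | p0 :: rest =>                    -- len(positions) > 1 branch
    let st := convert_to_runs_loop [] p0 p0 rest
    -- final `runs.append((run_start_pos, sp))`: after the loop sp = prev_pos,
    -- since both branches of the loop body assign prev_pos = sp
    st.1 ++ [(st.2.2, st.2.1)]

-- ===== PORT B =====
-- Source B: rev accumulates the runs of the processed suffix (leftmost run last, accessed
-- via rev[-1] = getLast?, rev[-1] mutation = dropLast ++ [·]); then rev.reverse()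
def convert_to_runs_alt (positions : List Int) : List (Int × Int) :=
  let rev := positions.reverse.foldl (fun (rev : List (Int × Int)) p =>
    match rev.getLast? with
    | some lastRun =>
      if lastRun.1 == p + 1 then rev.dropLast ++ [(p, lastRun.2)]
      else rev ++ [(p, p)]
    | none => rev ++ [(p, p)]) []
  rev.reverse

-- ===== PRECONDITION & SPEC =====
def Spec_convert_to_runs (positions : List Int) (out : List (Int × Int)) : Prop := out = convert_to_runs_alt positions
instance (positions : List Int) (out : List (Int × Int)) : Decidable (Spec_convert_to_runs positions out) := by unfold Spec_convert_to_runs; infer_instance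

-- ===== CLAIM (what is proved, stated in full; the proofs are below) =====
def Claim_equal_convert_to_runs : Prop := ∀ (positions : List Int), Dom_convert_to_runs positions → Spec_convert_to_runs positions (convert_to_runs positions)

-- ===== LEMMAS AND PROOFS =====

-- merge a pending run (start..prev) with an already-computed run list
def pvMerge2 (start prev : Int) (r : List (Int × Int)) : List (Int × Int) :=
  match r with
  | (a, b) :: rs => if a = prev + 1 then (start, b) :: rs else (start, prev) :: (a, b) :: rs
  | [] => [(start, prev)]

-- reference recursion: merge head p into the runs of the tail
def pvRuns : List Int → List (Int × Int)
  | [] => []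
  | p :: rest => pvMerge2 p p (pvRuns rest)

-- continuation semantics of A's loop: pending run start..prev, remaining input l
def pvG (start prev : Int) : List Int → List (Int × Int)
  | [] => [(start, prev)]
  | sp :: rest => if prev = sp - 1 then pvG start sp rest else (start, prev) :: pvG sp sp rest

lemma loop_spec (l : List Int) : ∀ (runs : List (Int × Int)) (prev start : Int),
    (convert_to_runs_loop runs prev start l).1 ++
      [((convert_to_runs_loop runs prev start l).2.2,
        (convert_to_runs_loop runs prev start l).2.1)]
    = runs ++ pvG start prev l := by
  induction l with
  | nil => intro runs prev start; simp [convert_to_runs_loop, pvG]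
  | cons sp rest ih =>
    intro runs prev start
    by_cases hc : prev = sp - 1
    · rw [show convert_to_runs_loop runs prev start (sp :: rest)
            = convert_to_runs_loop runs sp start rest from by
          simp [convert_to_runs_loop, hc]]
      rw [ih runs sp start]
      simp [pvG, hc]
    · rw [show convert_to_runs_loop runs prev start (sp :: rest)
            = convert_to_runs_loop (runs ++ [(start, prev)]) sp sp rest from by
          simp [convert_to_runs_loop, hc]]
      rw [ih (runs ++ [(start, prev)]) sp sp]
      simp [pvG, hc]

lemma pvG_eq (l : List Int) : ∀ (start prev : Int),
    pvG start prev l = pvMerge2 start prev (pvRuns l) := by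
  induction l with
  | nil => intro start prev; rfl
  | cons sp rest ih =>
    intro start prev
    by_cases hc : prev = sp - 1
    · rw [show pvG start prev (sp :: rest) = pvG start sp rest by simp [pvG, hc]]
      rw [ih start sp]
      show _ = pvMerge2 start prev (pvMerge2 sp sp (pvRuns rest))
      cases hr : pvRuns rest with
      | nil => simp [pvMerge2, show sp = prev + 1 by omega]
      | cons hd rs =>
        obtain ⟨a, b⟩ := hd
        by_cases ha : a = sp + 1
        · simp [pvMerge2, ha, show sp = prev + 1 by omega]
        · simp [pvMerge2, show sp = prev + 1 by omega,
            show ¬ a = prev + 1 + 1 by omega]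
    · rw [show pvG start prev (sp :: rest) = (start, prev) :: pvG sp sp rest by simp [pvG, hc]]
      rw [ih sp sp]
      show _ = pvMerge2 start prev (pvMerge2 sp sp (pvRuns rest))
      cases hr : pvRuns rest with
      | nil => simp [pvMerge2, show ¬ sp = prev + 1 by omega]
      | cons hd rs =>
        obtain ⟨a, b⟩ := hd
        by_cases ha : a = sp + 1 <;>
          simp [pvMerge2, ha, show ¬ sp = prev + 1 by omega]

-- A equals the reference recursion
lemma convert_to_runs_eq_pvRuns (l : List Int) : convert_to_runs l = pvRuns l := by
  match l with
  | [] => rfl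
  | [p] => simp [convert_to_runs, pvRuns, pvMerge2]
  | p0 :: sp :: rest =>
    show (convert_to_runs_loop [] p0 p0 (sp :: rest)).1 ++ _ = _
    rw [loop_spec (sp :: rest) [] p0 p0, pvG_eq (sp :: rest) p0 p0]
    simp [pvRuns]

-- one reverse-scan step on a reversed accumulator is pvMerge2 p p
lemma step_reverse (r : List (Int × Int)) (p : Int) :
    (match r.reverse.getLast? with
     | some lastRun =>
       if lastRun.1 == p + 1 then r.reverse.dropLast ++ [(p, lastRun.2)]
       else r.reverse ++ [(p, p)]
     | none => r.reverse ++ [(p, p)]) = (pvMerge2 p p r).reverse := by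
  cases r with
  | nil => simp [pvMerge2]
  | cons hd tl =>
    obtain ⟨a, b⟩ := hd
    by_cases h : a = p + 1 <;>
      simp [pvMerge2, h, List.getLast?_reverse]

-- B equals the reference recursion
lemma convert_to_runs_alt_eq_pvRuns (l : List Int) : convert_to_runs_alt l = pvRuns l := by
  have key : ∀ (l : List Int),
      l.reverse.foldl (fun (rev : List (Int × Int)) p =>
        match rev.getLast? with
        | some lastRun =>
          if lastRun.1 == p + 1 then rev.dropLast ++ [(p, lastRun.2)]
          else rev ++ [(p, p)]
        | none => rev ++ [(p, p)]) [] = (pvRuns l).reverse := by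
    intro l
    induction l with
    | nil => rfl
    | cons p rest ih =>
      simp only [List.reverse_cons, List.foldl_append, List.foldl_cons, List.foldl_nil, ih]
      exact step_reverse (pvRuns rest) p
  unfold convert_to_runs_alt
  rw [key]
  simp

-- ===== VERDICT (by name: the statement is the Claim_ definition above) =====
theorem convert_to_runs_spec : Claim_equal_convert_to_runs := by
  intro positions _
  unfold Spec_convert_to_runs
  rw [convert_to_runs_eq_pvRuns, convert_to_runs_alt_eq_pvRuns]
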